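-- pv_equiv track=rewrite | github.com/billy-yoyo/AdventOfCode | 2021/day 23/puzzle_pt2.py | compute_hole_discount
-- ===== SOURCE A (Python) =====
-- def is_hole(n):
--     return n in (0, 8)
--
-- def compute_hole_discount(movement_stack):
--     discount = 0
--     sizes = [(0, False)] * 9
--     for _, start, end, _ in movement_stack:
--         if is_hole(end):
--             size, _ = sizes[end]
--             if size >= 1:
--                 sizes[end] = (size + 1, True)
--             else:
--                 sizes[end] = (1, False)
--
--         if is_hole(start):
--             size, has_been_full = sizes[start]
--             if size == 1:
--                 if not has_been_full:
--                     discount += 2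
--                 sizes[start] = (0, False)
--             else:
--                 sizes[start] = (size - 1, has_been_full)
--     return discount
-- ===== SOURCE B (Python) =====
-- def _hole_discount(movement_stack, h):
--     discount = 0
--     size = 0
--     has_been_full = False
--     for _, start, end, _ in movement_stack:
--         if end == h:
--             if size >= 1:
--                 size += 1
--                 has_been_full = True
--             else:
--                 size = 1
--                 has_been_full = False
--         if start == h:
--             if size == 1:
--                 if not has_been_full:
--                     discount += 2
--                 size = 0
--                 has_been_full = False
--             else:
--                 size -= 1
--     return discount
--
-- def compute_hole_discount(movement_stack):
--     return _hole_discount(movement_stack, 0) + _hole_discount(movement_stack, 8)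
-- ===== Notes on version B (the rewrite author's own statement) =====
-- stated objective: alternative
-- what changed: A threads one 9-slot mutable sizes array through a single loop; B runs a reusable single-hole linear pass (tracking just that hole's (size, has_been_full) and discount) once for hole 0 and once for hole 8 and sums the two results.
import Mathlib
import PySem

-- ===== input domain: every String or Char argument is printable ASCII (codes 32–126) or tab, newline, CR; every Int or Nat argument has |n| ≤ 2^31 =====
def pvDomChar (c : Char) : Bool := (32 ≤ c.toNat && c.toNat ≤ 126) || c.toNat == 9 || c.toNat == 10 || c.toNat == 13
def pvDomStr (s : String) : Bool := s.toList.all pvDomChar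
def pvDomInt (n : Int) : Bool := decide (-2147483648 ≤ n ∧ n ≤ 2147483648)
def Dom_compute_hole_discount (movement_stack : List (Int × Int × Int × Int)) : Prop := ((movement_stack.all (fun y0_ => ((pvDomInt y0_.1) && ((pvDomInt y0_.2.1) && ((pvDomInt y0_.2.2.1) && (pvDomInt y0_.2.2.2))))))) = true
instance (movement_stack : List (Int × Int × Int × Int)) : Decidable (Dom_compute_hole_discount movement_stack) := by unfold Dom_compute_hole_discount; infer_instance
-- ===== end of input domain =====

-- B replaces A's 9-slot sizes array with one reusable single-hole pass run once per hole (0 and 8)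
-- and sums the two results; objective: alternative decomposition, same linear cost.


-- ===== PORT A =====
def is_hole (n : Int) : Bool := n == 0 || n == 8

-- one iteration of A's for-loop; sizes[end] / sizes[start] are only read/written when
-- is_hole holds, so the index is 0 or 8 and getD/set at toNat is exact (the default is unreachable)
def stepA (st : Int × List (Int × Bool)) (m : Int × Int × Int × Int) : Int × List (Int × Bool) :=
  let discount := st.1
  let start := m.2.1
  let en := m.2.2.1
  let sizes :=
    if is_hole en then
      let p := st.2.getD en.toNat (0, false)
      if p.1 ≥ 1 then st.2.set en.toNat (p.1 + 1, true)
      else st.2.set en.toNat (1, false)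
    else st.2
  if is_hole start then
    let p := sizes.getD start.toNat (0, false)
    if p.1 == 1 then
      ((if !p.2 then discount + 2 else discount), sizes.set start.toNat (0, false))
    else (discount, sizes.set start.toNat (p.1 - 1, p.2))
  else (discount, sizes)

def compute_hole_discount (movement_stack : List (Int × Int × Int × Int)) : Int :=
  (movement_stack.foldl stepA (0, List.replicate 9 (0, false))).1

-- ===== PORT B =====
-- one iteration of _hole_discount's loop for hole h; state = (discount, size, has_been_full)
def stepB (h : Int) (st : Int × Int × Bool) (m : Int × Int × Int × Int) : Int × Int × Bool :=
  let discount := st.1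
  let size := st.2.1
  let hbf := st.2.2
  let s1 :=
    if m.2.2.1 == h then
      if size ≥ 1 then (size + 1, true) else ((1 : Int), false)
    else (size, hbf)
  if m.2.1 == h then
    if s1.1 == 1 then
      ((if !s1.2 then discount + 2 else discount), (0 : Int), false)
    else (discount, s1.1 - 1, s1.2)
  else (discount, s1.1, s1.2)

def hole_discount (movement_stack : List (Int × Int × Int × Int)) (h : Int) : Int :=
  (movement_stack.foldl (stepB h) (0, 0, false)).1

def compute_hole_discount_alt (movement_stack : List (Int × Int × Int × Int)) : Int :=
  hole_discount movement_stack 0 + hole_discount movement_stack 8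

-- ===== PRECONDITION & SPEC =====
def Spec_compute_hole_discount (movement_stack : List (Int × Int × Int × Int)) (out : Int) : Prop := out = compute_hole_discount_alt movement_stack
instance (movement_stack : List (Int × Int × Int × Int)) (out : Int) : Decidable (Spec_compute_hole_discount movement_stack out) := by unfold Spec_compute_hole_discount; infer_instance

-- ===== CLAIM (what is proved, stated in full; the proofs are below) =====
def Claim_equal_compute_hole_discount : Prop := ∀ (movement_stack : List (Int × Int × Int × Int)), Dom_compute_hole_discount movement_stack → Spec_compute_hole_discount movement_stack (compute_hole_discount movement_stack)

-- ===== LEMMAS AND PROOFS =====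

-- A's sizes array when holes 0 and 8 carry states s0 and s8 (the other 7 slots never change)
def mkSizes (s0 s8 : Int × Bool) : List (Int × Bool) :=
  [s0, (0, false), (0, false), (0, false), (0, false), (0, false), (0, false), (0, false), s8]

theorem step_mk (d0 d8 : Int) (s0 s8 : Int × Bool) (m : Int × Int × Int × Int) :
    stepA (d0 + d8, mkSizes s0 s8) m
      = ((stepB 0 (d0, s0) m).1 + (stepB 8 (d8, s8) m).1,
         mkSizes (stepB 0 (d0, s0) m).2 (stepB 8 (d8, s8) m).2) := by
  obtain ⟨a, start, en, b⟩ := m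
  by_cases he0 : en = 0 <;> by_cases he8 : en = 8 <;>
    by_cases hs0 : start = 0 <;> by_cases hs8 : start = 8 <;>
      simp_all [stepA, stepB, is_hole, mkSizes] <;>
        split_ifs <;> simp_all <;> omega

theorem fold_mk (ms : List (Int × Int × Int × Int)) :
    ∀ (d0 d8 : Int) (s0 s8 : Int × Bool),
      (ms.foldl stepA (d0 + d8, mkSizes s0 s8)).1
        = (ms.foldl (stepB 0) (d0, s0)).1 + (ms.foldl (stepB 8) (d8, s8)).1 := by
  induction ms with
  | nil => intro d0 d8 s0 s8; simp
  | cons m ms ih =>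
      intro d0 d8 s0 s8
      simp only [List.foldl_cons, step_mk]
      exact ih _ _ _ _

-- ===== VERDICT (by name: the statement is the Claim_ definition above) =====
theorem compute_hole_discount_spec : Claim_equal_compute_hole_discount := by
  intro ms _
  show compute_hole_discount ms = compute_hole_discount_alt ms
  have h := fold_mk ms 0 0 (0, false) (0, false)
  simpa [compute_hole_discount, compute_hole_discount_alt, hole_discount, mkSizes,
    List.replicate] using h
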